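-- pv_equiv track=rewrite | github.com/pypi-data/pypi-mirror-401 | packages/tracekit/tracekit-0.3.0.tar.gz/tracekit-0.3.0/examples/04_protocol_decoding/04_can_decoding.py | _apply_bit_stuffing
-- ===== SOURCE A (Python) =====
-- def _apply_bit_stuffing(bits: list[int]) -> list[int]:
--     """Apply CAN bit stuffing (insert opposite bit after 5 same bits)."""
--     stuffed = []
--     consecutive = 0
--     last_bit = None
--
--     # Only stuff up to CRC delimiter (not ACK, ACK delimiter, EOF)
--     stuff_region_end = len(bits) - 10  # Approximate
--
--     for i, bit in enumerate(bits):
--         stuffed.append(bit)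
--
--         if i < stuff_region_end:
--             if last_bit is not None and bit == last_bit:
--                 consecutive += 1
--                 if consecutive >= 5:
--                     # Insert stuff bit (opposite)
--                     stuffed.append(1 - bit)
--                     consecutive = 1
--                     last_bit = 1 - bit
--                     continue
--             else:
--                 consecutive = 1
--
--         last_bit = bit
--
--     return stuffed
-- ===== SOURCE B (Python) =====
-- from itertools import groupby
--
--
-- def _apply_bit_stuffing(bits: list[int]) -> list[int]:
--     """Apply CAN bit stuffing (insert opposite bit after 5 same bits)."""
--     cut = max(len(bits) - 10, 0)
--     out = []
--     last = None
--     for v, grp in groupby(bits[:cut]):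
--         n = sum(1 for _ in grp)
--         # a stuff bit equal to v counts toward this run
--         first = 4 if v == last else 5
--         stuffed_at_end = False
--         while n >= first:
--             out.extend([v] * first)
--             out.append(1 - v)
--             n -= first
--             first = 5
--             stuffed_at_end = n == 0
--         out.extend([v] * n)
--         last = (1 - v) if stuffed_at_end else v
--     out.extend(bits[cut:])
--     return out
-- ===== Notes on version B (the rewrite author's own statement) =====
-- stated objective: alternative
-- what changed: Replaced A's per-bit state machine (index, consecutive counter, last_bit) over enumerate(bits) by a run-length pass: group bits[:len-10] into maximal runs with groupby, expand each run with a stuff bit after the first 4-or-5 bits and then after every 5 (a stuff bit equal to the next run's value counts toward it), and append the untouched 10-bit tail.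
import Mathlib
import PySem

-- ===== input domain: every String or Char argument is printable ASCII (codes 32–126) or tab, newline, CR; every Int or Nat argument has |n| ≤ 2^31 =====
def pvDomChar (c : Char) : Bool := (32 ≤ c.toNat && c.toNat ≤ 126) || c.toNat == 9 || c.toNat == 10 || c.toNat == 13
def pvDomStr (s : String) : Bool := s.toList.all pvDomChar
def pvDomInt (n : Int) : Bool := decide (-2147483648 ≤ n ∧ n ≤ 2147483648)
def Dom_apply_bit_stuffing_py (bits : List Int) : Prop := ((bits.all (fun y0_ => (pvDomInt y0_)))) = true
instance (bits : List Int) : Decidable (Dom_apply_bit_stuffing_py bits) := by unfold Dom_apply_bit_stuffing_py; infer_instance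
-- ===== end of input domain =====

-- B replaces A's per-bit index/consecutive/last_bit state machine by a run-length
-- (group-then-expand) pass over the head bits[:len-10]; alternative decomposition, same cost.


-- ===== PORT A =====
-- one loop step: state = (stuffed, consecutive, last_bit), input = (i, bit)
def stepA (endi : Int) (st : List Int × Int × Option Int) (p : Int × Int) :
    List Int × Int × Option Int :=
  let stuffed := st.1 ++ [p.2]
  let consecutive := st.2.1
  let bit := p.2
  if p.1 < endi then
    match st.2.2 with
    | some lb =>
      if bit = lb then
        if consecutive + 1 ≥ 5 then
          (stuffed ++ [1 - bit], 1, some (1 - bit))   -- insert stuff bit, continue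
        else
          (stuffed, consecutive + 1, some bit)
      else
        (stuffed, 1, some bit)
    | none => (stuffed, 1, some bit)
  else
    (stuffed, consecutive, some bit)

def apply_bit_stuffing_py (bits : List Int) : List Int :=
  let stuff_region_end : Int := (bits.length : Int) - 10
  ((PySem.List.enumerate bits).foldl (stepA stuff_region_end) ([], 0, none)).1

-- ===== PORT B =====
-- groupby step: length of the maximal prefix equal to v, and the remainder
def takeRun (v : Int) : List Int → Nat × List Int
  | [] => (0, ([] : List Int))
  | x :: _xs => if x = v then ((takeRun v _xs).1 + 1, (takeRun v _xs).2) else (0, x :: _xs)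

theorem takeRun_rest_len (v : Int) (l : List Int) : (takeRun v l).2.length ≤ l.length := by
  induction l with
  | nil => simp [takeRun]
  | cons x xs ih =>
    simp only [takeRun]
    split
    · simp; omega
    · simp

-- the while loop: emit a run of n v's, a stuff bit after the first `first` and then
-- after every 5; returns (emitted bits, whether the run ended exactly at a stuff bit)
def emitRun (v : Int) (n first : Nat) : List Int × Bool :=
  if h1 : first ≤ n ∧ 0 < first then
    if n = first then (List.replicate first v ++ [1 - v], true)
    else
      let r := emitRun v (n - first) 5
      (List.replicate first v ++ [1 - v] ++ r.1, r.2)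
  else (List.replicate n v, false)
termination_by n
decreasing_by omega

-- the for loop over groups; `last` = A's last_bit at the group boundary
def stuffB (l : List Int) (last : Option Int) : List Int :=
  match l with
  | [] => []
  | x :: xs =>
    let r := takeRun x xs
    let first : Nat := if some x = last then 4 else 5
    let e := emitRun x (r.1 + 1) first
    e.1 ++ stuffB r.2 (if e.2 then some (1 - x) else some x)
termination_by l.length
decreasing_by
  have := takeRun_rest_len x xs
  simp only [List.length_cons]
  omega

def apply_bit_stuffing_py_alt (bits : List Int) : List Int :=
  let cut : Nat := ((bits.length : Int) - 10).toNat   -- = max(len(bits)-10, 0)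
  stuffB (bits.take cut) none ++ bits.drop cut

-- ===== PRECONDITION & SPEC =====
def Spec_apply_bit_stuffing_py (bits : List Int) (out : List Int) : Prop := out = apply_bit_stuffing_py_alt bits
instance (bits : List Int) (out : List Int) : Decidable (Spec_apply_bit_stuffing_py bits out) := by unfold Spec_apply_bit_stuffing_py; infer_instance

-- ===== CLAIM (what is proved, stated in full; the proofs are below) =====
def Claim_equal_apply_bit_stuffing_py : Prop := ∀ (bits : List Int), Dom_apply_bit_stuffing_py bits → Spec_apply_bit_stuffing_py bits (apply_bit_stuffing_py bits)

-- ===== LEMMAS AND PROOFS =====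

-- A's loop as a structural recursion producing only the newly appended bits
def goA (endi i c : Int) (lb : Option Int) : List Int → List Int
  | [] => []
  | bit :: rest =>
    if i < endi then
      match lb with
      | some l =>
        if bit = l then
          if c + 1 ≥ 5 then bit :: (1 - bit) :: goA endi (i + 1) 1 (some (1 - bit)) rest
          else bit :: goA endi (i + 1) (c + 1) (some bit) rest
        else bit :: goA endi (i + 1) 1 (some bit) rest
      | none => bit :: goA endi (i + 1) 1 (some bit) rest
    else bit :: goA endi (i + 1) c (some bit) rest

-- in-region loop (condition i < endi always true)
def goH (c : Int) (lb : Option Int) : List Int → List Int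
  | [] => []
  | bit :: rest =>
    match lb with
    | some l =>
      if bit = l then
        if c + 1 ≥ 5 then bit :: (1 - bit) :: goH 1 (some (1 - bit)) rest
        else bit :: goH (c + 1) (some bit) rest
      else bit :: goH 1 (some bit) rest
    | none => bit :: goH 1 (some bit) rest

theorem foldA_eq (endi : Int) (l : List Int) :
    ∀ (i : Int) (acc : List Int) (c : Int) (lb : Option Int),
    (List.foldl (stepA endi) (acc, c, lb) (PySem.List.enumerate l i)).1
      = acc ++ goA endi i c lb l := by
  induction l with
  | nil => intro i acc c lb; simp [PySem.List.enumerate_nil, goA]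
  | cons bit rest ih =>
    intro i acc c lb
    rw [PySem.List.enumerate_cons]
    simp only [List.foldl_cons, goA, stepA]
    by_cases h : i < endi
    · simp only [h, if_pos]
      match lb with
      | none => simp [ih]
      | some l =>
        by_cases hb : bit = l
        · by_cases h5 : c + 1 ≥ 5
          · simp only [hb, if_pos, h5, ih]; simp
          · simp only [hb, if_pos, if_neg h5, ih]; simp
        · simp only [if_neg hb, ih]; simp
    · simp only [if_neg h, ih]; simp

theorem goA_split (endi : Int) (l : List Int) :
    ∀ (i c : Int) (lb : Option Int),
    goA endi i c lb l = goH c lb (l.take (endi - i).toNat) ++ l.drop (endi - i).toNat := by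
  induction l with
  | nil => intro i c lb; simp [goA, goH]
  | cons bit rest ih =>
    intro i c lb
    by_cases h : i < endi
    · have hk : (endi - i).toNat = (endi - (i + 1)).toNat + 1 := by omega
      rw [hk]
      simp only [goA, if_pos h, List.take_succ_cons, List.drop_succ_cons, goH]
      match lb with
      | none => simp [ih]
      | some lv =>
        by_cases hb : bit = lv
        · by_cases h5 : c + 1 ≥ 5
          · simp [hb, h5, ih]
          · simp [hb, h5, ih]
        · simp [hb, ih]
    · have hk : (endi - i).toNat = 0 := by omega
      have hk' : (endi - (i + 1)).toNat = 0 := by omega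
      rw [hk]
      simp only [goA, if_neg h, List.take_zero, List.drop_zero, goH, List.nil_append]
      rw [ih, hk']
      simp [goH]

-- the consecutive counter is irrelevant when the next bit differs from last_bit
theorem goH_irrel (c c' : Int) (v : Int) (l : List Int)
    (h : ∀ y, l.head? = some y → y ≠ v) :
    goH c (some v) l = goH c' (some v) l := by
  match l with
  | [] => rfl
  | y :: t =>
    have hy : y ≠ v := h y rfl
    simp [goH, hy]

-- peeling one bit off the front of a run shifts emitRun's first threshold by one
theorem emitRun_shift (v : Int) (n f : Nat) (hf : 1 ≤ f) :
    emitRun v (n + 1) (f + 1) = (v :: (emitRun v n f).1, (emitRun v n f).2) := by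
  conv_lhs => rw [emitRun]
  conv_rhs => rw [emitRun]
  by_cases h : f ≤ n
  · rw [dif_pos (by omega : f + 1 ≤ n + 1 ∧ 0 < f + 1), dif_pos (by omega : f ≤ n ∧ 0 < f)]
    by_cases he : n = f
    · rw [if_pos (by omega : n + 1 = f + 1), if_pos he]
      simp [List.replicate_succ]
    · rw [if_neg (by omega : ¬ n + 1 = f + 1), if_neg he]
      have h1 : n + 1 - (f + 1) = n - f := by omega
      simp [h1, List.replicate_succ]
  · rw [dif_neg (by omega : ¬ (f + 1 ≤ n + 1 ∧ 0 < f + 1)), dif_neg (by omega : ¬ (f ≤ n ∧ 0 < f))]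
    simp [List.replicate_succ]

-- a run of m v's entering with count c is emitted exactly as emitRun v m (5-c)
theorem goH_run (m : Nat) : ∀ (c : Int) (v : Int) (rest : List Int),
    1 ≤ c → c ≤ 4 → (∀ y, rest.head? = some y → y ≠ v) →
    goH c (some v) (List.replicate m v ++ rest)
      = (emitRun v m (5 - c).toNat).1
        ++ goH 1 (if (emitRun v m (5 - c).toNat).2 then some (1 - v) else some v) rest := by
  induction m using Nat.strong_induction_on with
  | _ m ih =>
    intro c v rest hc1 hc4 hrest
    match m with
    | 0 =>
      rw [emitRun]
      rw [dif_neg (by omega : ¬ ((5 - c).toNat ≤ 0 ∧ 0 < (5 - c).toNat))]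
      simp only [List.replicate_zero, List.nil_append, Bool.false_eq_true]
      exact goH_irrel _ 1 v rest hrest
    | m' + 1 =>
      simp only [List.replicate_succ, List.cons_append, goH]
      by_cases h5 : c + 1 ≥ 5
      · -- c = 4 : stuff right after this bit
        have hc : c = 4 := by omega
        subst hc
        rw [if_pos h5]
        have ht : ((5:Int) - 4).toNat = 1 := by decide
        rw [ht]
        match m' with
        | 0 =>
          rw [emitRun, dif_pos (by omega : 1 ≤ 1 ∧ 0 < 1), if_pos rfl]
          simp
        | m'' + 1 =>
          rw [emitRun, dif_pos (by omega : 1 ≤ m'' + 1 + 1 ∧ 0 < 1),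
              if_neg (by omega : ¬ m'' + 1 + 1 = 1)]
          have h1 : m'' + 1 + 1 - 1 = m'' + 1 := by omega
          rw [h1, emitRun_shift v m'' 4 (by omega)]
          have hvne : v ≠ 1 - v := by omega
          simp only [List.replicate_succ, List.cons_append, goH, if_neg hvne]
          have h4 : ((5:Int) - 1).toNat = 4 := by decide
          have := ih m'' (by omega) 1 v rest (by omega) (by omega) hrest
          rw [h4] at this
          rw [this]
          simp
      · -- c ≤ 3 : keep counting
        rw [if_neg h5]
        have h54 : ((5:Int) - c).toNat = ((5:Int) - (c + 1)).toNat + 1 := by omega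
        rw [h54, emitRun_shift v m' _ (by omega)]
        rw [ih m' (by omega) (c + 1) v rest (by omega) (by omega) hrest]
        simp

-- takeRun decomposes the list into the run and a remainder whose head differs
theorem takeRun_spec (v : Int) (l : List Int) :
    l = List.replicate (takeRun v l).1 v ++ (takeRun v l).2
    ∧ (∀ y, (takeRun v l).2.head? = some y → y ≠ v) := by
  induction l with
  | nil => simp [takeRun]
  | cons x xs ih =>
    by_cases h : x = v
    · simp only [takeRun, if_pos h]
      refine ⟨?_, ih.2⟩
      conv_lhs => rw [ih.1]
      simp [List.replicate_succ, h]
    · simp only [takeRun, if_neg h]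
      exact ⟨by simp, by intro y hy; simp at hy; omega⟩

-- main head lemma: goH starting fresh (count 1) = B's group-then-expand pass
theorem goH_eq_stuffB (n : Nat) : ∀ (l : List Int), l.length ≤ n → ∀ (lb : Option Int),
    goH 1 lb l = stuffB l lb := by
  induction n with
  | zero => intro l hl lb; match l with | [] => rw [stuffB]; simp [goH]
  | succ n ih =>
    intro l hl lb
    match l with
    | [] => rw [stuffB]; simp [goH]
    | x :: xs =>
      obtain ⟨hdec, hhead⟩ := takeRun_spec x xs
      have hrl := takeRun_rest_len x xs
      have hxs : xs.length ≤ n := by simp at hl; omega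
      have hrest_n : (takeRun x xs).2.length ≤ n := by omega
      rw [stuffB]
      -- process the first bit of the run, then goH_run on the remaining copies
      have hfirst : ∀ (c : Int), 1 ≤ c → c ≤ 2 →
          goH c (some x) xs
            = (emitRun x ((takeRun x xs).1) (5 - c).toNat).1
              ++ stuffB (takeRun x xs).2
                  (if (emitRun x ((takeRun x xs).1) (5 - c).toNat).2 then some (1 - x) else some x) := by
        intro c h1 h2
        conv_lhs => rw [hdec]
        rw [goH_run _ c x _ h1 (by omega) hhead]
        congr 1
        exact ih _ hrest_n _
      match lb with
      | none =>
        rw [if_neg (by simp : ¬ (some x = (none : Option Int)))]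
        have h5 : (5:Nat) = 4 + 1 := by omega
        have h4 : ((5:Int) - 1).toNat = 4 := by decide
        rw [h5, emitRun_shift x _ 4 (by omega), ← h4]
        simp only [goH]
        rw [hfirst 1 (by omega) (by omega)]
        simp
      | some w =>
        by_cases hw : x = w
        · subst hw
          rw [if_pos rfl]
          have h4 : (4:Nat) = 3 + 1 := by omega
          have h3 : ((5:Int) - 2).toNat = 3 := by decide
          rw [h4, emitRun_shift x _ 3 (by omega), ← h3]
          simp only [goH]
          rw [if_neg (by omega : ¬ (1:Int) + 1 ≥ 5)]
          simp only [if_true]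
          have h12 : (1:Int) + 1 = 2 := by norm_num
          rw [h12, hfirst 2 (by omega) (by omega)]
          simp
        · rw [if_neg (by simp [hw] : ¬ (some x = some w))]
          have h5 : (5:Nat) = 4 + 1 := by omega
          have h4 : ((5:Int) - 1).toNat = 4 := by decide
          rw [h5, emitRun_shift x _ 4 (by omega), ← h4]
          simp only [goH, if_neg hw]
          rw [hfirst 1 (by omega) (by omega)]
          simp

theorem goH_zero_one (l : List Int) : goH 0 none l = goH 1 none l := by
  match l with
  | [] => rfl
  | x :: xs => simp [goH]

-- ===== VERDICT (by name: the statement is the Claim_ definition above) =====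
theorem apply_bit_stuffing_py_spec : Claim_equal_apply_bit_stuffing_py := by
  intro bits _
  unfold Spec_apply_bit_stuffing_py apply_bit_stuffing_py apply_bit_stuffing_py_alt
  simp only []
  rw [show PySem.List.enumerate bits = PySem.List.enumerate bits 0 from rfl]
  rw [foldA_eq, goA_split]
  simp only [List.nil_append, Int.sub_zero]
  rw [goH_zero_one, goH_eq_stuffB (bits.take ((bits.length : Int) - 10).toNat).length _ (le_refl _)]
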